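-- pv_equiv track=rewrite | github.com/saad-ahmed98/ocrNDF | dataFinder.py | isDataToFind
-- ===== SOURCE A (Python) =====
-- dataToFind = {
--     "TTC": ["T.T.C.", "TTC", "ITC", "TIC","T.T.C"],
--     "TVA": ["TVA", "T.V.A", "TWA", "TWAA", "1WA", "1VA", "IVA", "TYA", "TY=A", "TVAA", " WA", " VA", "VRA", "TUA", "TOA"],
--     "HT": ["HT","NET", "H.T.", "H.T","HT", "H,T,", "H,T","HI", "H.I.", "H.I", "H1", "HF", "H|"],
--     "SIRET": ["SIRET", "BIRET", "SIREN", "S1RET", "S1RE1", "SIRE1", "SIRE1"],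
--     "NAF": ["NAF", "NAT", "MAF", "MAT", "WIF"]
-- }
--
-- def isDataToFind(v, key):
--     value = v.upper()
--     if value in dataToFind[key]:
--         return True
--     splitval = value.split()
--     for spl in splitval:
--         if spl in dataToFind[key]:
--             return True
--         if len(spl) == len(key):
--             if len(lcs(spl, key)) >= 3:
--                 return True
--     if value.replace(" ", "") in dataToFind[key]:
--         return True
--     return False
--
-- def lcs(S, T):
--     m = len(S)
--     n = len(T)
--     counter = [[0]*(n+1) for x in range(m+1)]
--     longest = 0
--     lcs_set = []
--     for i in range(m):
--         for j in range(n):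
--             if S[i] == T[j]:
--                 c = counter[i][j] + 1
--                 counter[i+1][j+1] = c
--                 if c > longest:
--                     lcs_set = []
--                     longest = c
--                     lcs_set.append(S[i-c+1:i+1])
--                 elif c == longest:
--                     lcs_set.append(S[i-c+1:i+1])
--     if len(lcs_set) > 0:
--         lcs_set.sort(key=len, reverse=True)
--         return lcs_set[0]
--     return ""
-- ===== SOURCE B (Python) =====
-- dataToFind = {
--     "TTC": ["T.T.C.", "TTC", "ITC", "TIC","T.T.C"],
--     "TVA": ["TVA", "T.V.A", "TWA", "TWAA", "1WA", "1VA", "IVA", "TYA", "TY=A", "TVAA", " WA", " VA", "VRA", "TUA", "TOA"],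
--     "HT": ["HT","NET", "H.T.", "H.T","HT", "H,T,", "H,T","HI", "H.I.", "H.I", "H1", "HF", "H|"],
--     "SIRET": ["SIRET", "BIRET", "SIREN", "S1RET", "S1RE1", "SIRE1", "SIRE1"],
--     "NAF": ["NAF", "NAT", "MAF", "MAT", "WIF"]
-- }
--
-- def isDataToFind(v, key):
--     value = v.upper()
--     words = dataToFind[key]
--     if value in words:
--         return True
--     for spl in value.split():
--         if spl in words:
--             return True
--         if len(spl) == len(key) and any(spl[i:i+3] in key for i in range(len(spl) - 2)):
--             return True
--     if value.replace(" ", "") in words: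
--         return True
--     return False
-- ===== Notes on version B (the rewrite author's own statement) =====
-- stated objective: simpler
-- what changed: Replaces A's 2-D longest-common-substring dynamic-programming helper (lcs: full (m+1)x(n+1) counter matrix plus a collected, sorted list of candidate substrings) with a direct scan testing whether some length-3 contiguous window of the word occurs in the key; the surrounding membership checks keep their order.
import Mathlib
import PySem

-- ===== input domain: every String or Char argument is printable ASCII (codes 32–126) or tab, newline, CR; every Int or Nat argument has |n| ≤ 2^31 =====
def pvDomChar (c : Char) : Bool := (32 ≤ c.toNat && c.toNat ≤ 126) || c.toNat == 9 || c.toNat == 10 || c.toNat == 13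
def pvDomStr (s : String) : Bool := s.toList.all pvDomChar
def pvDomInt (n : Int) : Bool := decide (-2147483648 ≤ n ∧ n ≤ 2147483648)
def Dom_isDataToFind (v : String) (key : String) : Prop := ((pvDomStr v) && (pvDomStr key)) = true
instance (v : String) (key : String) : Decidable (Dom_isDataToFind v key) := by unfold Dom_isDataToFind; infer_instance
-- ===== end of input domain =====

-- B replaces A's 2-D longest-common-substring DP helper (lcs) by a direct scan for a shared
-- length-3 window; the surrounding membership checks are unchanged.  Objective: simpler.

-- ===== PORT A =====
-- the module-level dict 'dataToFind' (A's copy)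
def dataToFindA : PySem.Dict String (List String) := PySem.Dict.ofList
  [("TTC", ["T.T.C.", "TTC", "ITC", "TIC", "T.T.C"]),
   ("TVA", ["TVA", "T.V.A", "TWA", "TWAA", "1WA", "1VA", "IVA", "TYA", "TY=A", "TVAA", " WA", " VA", "VRA", "TUA", "TOA"]),
   ("HT", ["HT", "NET", "H.T.", "H.T", "HT", "H,T,", "H,T", "HI", "H.I.", "H.I", "H1", "HF", "H|"]),
   ("SIRET", ["SIRET", "BIRET", "SIREN", "S1RET", "S1RE1", "SIRE1", "SIRE1"]),
   ("NAF", ["NAF", "NAT", "MAF", "MAT", "WIF"])]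

-- loop state of lcs: (counter, longest, lcs_set)
def LcsState : Type := List (List Int) × Int × List (List Char)

-- body of the inner 'for j in range(n)' loop of lcs
def lcsInner (S T : List Char) (i : Nat) (st : LcsState) (j : Nat) : LcsState :=
  if S.getD i ' ' == T.getD j ' ' then
    let c : Int := ((st.1.getD i []).getD j 0) + 1
    let counter' := st.1.set (i+1) ((st.1.getD (i+1) []).set (j+1) c)
    if c > st.2.1 then
      (counter', c, [PySem.List.slice S (some ((i : Int) - c + 1)) (some ((i : Int) + 1))])
    else if c == st.2.1 then
      (counter', st.2.1, st.2.2 ++ [PySem.List.slice S (some ((i : Int) - c + 1)) (some ((i : Int) + 1))])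
    else (counter', st.2.1, st.2.2)
  else st

-- helper lcs (A returns the string; the port works on code-point lists)
def lcsA (S T : List Char) : List Char :=
  let m := S.length
  let n := T.length
  let counter0 : List (List Int) := (List.range (m+1)).map (fun _ => (List.range (n+1)).map (fun _ => (0 : Int)))
  let st := (List.range m).foldl (fun st i => (List.range n).foldl (lcsInner S T i) st)
    ((counter0, (0 : Int), ([] : List (List Char))) : LcsState)
  if st.2.2.length > 0 then
    (PySem.List.sorted st.2.2 (fun x => (x.length : Int)) true).headD []
  else []

def isDataToFind (v : String) (key : String) : Bool :=
  let value := PySem.Str.upper v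
  match PySem.Dict.get? dataToFindA key with
  | none => false  -- Python raises KeyError here; excluded by Pre_isDataToFind
  | some words =>
    if words.contains value then true
    else if (PySem.Str.split₀ value).any (fun spl =>
        words.contains spl ||
        (PySem.Str.len spl == PySem.Str.len key &&
          decide (3 ≤ (lcsA spl.toList key.toList).length))) then true
    else words.contains (PySem.Str.replace value " " "")

-- ===== PORT B =====
-- the module-level dict 'dataToFind' (B's copy)
def dataToFindB : PySem.Dict String (List String) := PySem.Dict.ofList
  [("TTC", ["T.T.C.", "TTC", "ITC", "TIC", "T.T.C"]),
   ("TVA", ["TVA", "T.V.A", "TWA", "TWAA", "1WA", "1VA", "IVA", "TYA", "TY=A", "TVAA", " WA", " VA", "VRA", "TUA", "TOA"]),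
   ("HT", ["HT", "NET", "H.T.", "H.T", "HT", "H,T,", "H,T", "HI", "H.I.", "H.I", "H1", "HF", "H|"]),
   ("SIRET", ["SIRET", "BIRET", "SIREN", "S1RET", "S1RE1", "SIRE1", "SIRE1"]),
   ("NAF", ["NAF", "NAT", "MAF", "MAT", "WIF"])]

def isDataToFind_alt (v : String) (key : String) : Bool :=
  let value := PySem.Str.upper v
  match PySem.Dict.get? dataToFindB key with
  | none => false  -- Python raises KeyError here; excluded by Pre_isDataToFind
  | some words =>
    if words.contains value then true
    else if (PySem.Str.split₀ value).any (fun spl =>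
        words.contains spl ||
        (PySem.Str.len spl == PySem.Str.len key &&
          (List.range (spl.toList.length - 2)).any (fun i =>
            PySem.Chars.isIn ((spl.toList.drop i).take 3) key.toList))) then true
    else words.contains (PySem.Str.replace value " " "")

-- ===== PRECONDITION & SPEC =====
-- Python raises KeyError on dataToFind[key] for any key other than the five dict keys;
-- Pre_ admits exactly the keys on which A returns.
def Pre_isDataToFind (v : String) (key : String) : Prop :=
  key = "TTC" ∨ key = "TVA" ∨ key = "HT" ∨ key = "SIRET" ∨ key = "NAF"
instance (v : String) (key : String) : Decidable (Pre_isDataToFind v key) := by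
  unfold Pre_isDataToFind; infer_instance

def pvWitness_isDataToFind : String × String := ("T W A", "TVA")

def Spec_isDataToFind (v : String) (key : String) (out : Bool) : Prop := out = isDataToFind_alt v key
instance (v : String) (key : String) (out : Bool) : Decidable (Spec_isDataToFind v key out) := by
  unfold Spec_isDataToFind; infer_instance

-- ===== CLAIM (what is proved, stated in full; the proofs are below) =====
def Claim_equal_isDataToFind : Prop := ∀ (v : String) (key : String), Dom_isDataToFind v key → Pre_isDataToFind v key → Spec_isDataToFind v key (isDataToFind v key)

-- ===== LEMMAS AND PROOFS =====

-- length of the longest common suffix of S.take i and T.take j (the value A's DP cell (i,j) holds)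
def csuf (S T : List Char) : Nat → Nat → Nat
  | 0, _ => 0
  | _+1, 0 => 0
  | i+1, j+1 => if S.getD i ' ' == T.getD j ' ' then csuf S T i j + 1 else 0

-- max of csuf r (c+1) over c < k
def rowMax (S T : List Char) (r : Nat) : Nat → Nat
  | 0 => 0
  | k+1 => max (rowMax S T r k) (csuf S T r (k+1))

-- max of csuf (r+1) (c+1) over r < i, c < T.length
def maxRows (S T : List Char) : Nat → Nat
  | 0 => 0
  | i+1 => max (maxRows S T i) (rowMax S T (i+1) T.length)

-- contents of the counter matrix after rows < i are done and cells ≤ k of row i+1 are done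
def cellVal (S T : List Char) (i k r c : Nat) : Int :=
  if 1 ≤ r ∧ 1 ≤ c ∧ (r ≤ i ∨ (r = i+1 ∧ c ≤ k)) then (csuf S T r c : Int) else 0

def cntAfter (S T : List Char) (i k : Nat) : List (List Int) :=
  (List.range (S.length+1)).map (fun r => (List.range (T.length+1)).map (fun c => cellVal S T i k r c))

def lgAfter (S T : List Char) (i k : Nat) : Int :=
  ((max (maxRows S T i) (rowMax S T (i+1) k) : Nat) : Int)

def LcsInv (S T : List Char) (i k : Nat) (st : LcsState) : Prop :=
  st.1 = cntAfter S T i k ∧ st.2.1 = lgAfter S T i k ∧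
  (∀ x ∈ st.2.2, (x.length : Int) = st.2.1) ∧ (st.2.2 = [] ↔ st.2.1 = 0)

theorem csuf_le_left (S T : List Char) (i j : Nat) : csuf S T i j ≤ i := by
  induction i generalizing j with
  | zero => simp [csuf]
  | succ i ih =>
    cases j with
    | zero => simp [csuf]
    | succ j =>
      simp only [csuf]
      split_ifs
      · exact Nat.succ_le_succ (ih j)
      · omega

theorem csuf_le_right (S T : List Char) (i j : Nat) : csuf S T i j ≤ j := by
  induction i generalizing j with
  | zero => simp [csuf]
  | succ i ih =>
    cases j with
    | zero => simp [csuf]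
    | succ j =>
      simp only [csuf]
      split_ifs
      · exact Nat.succ_le_succ (ih j)
      · omega

theorem csuf_zero_right (S T : List Char) (i : Nat) : csuf S T i 0 = 0 := by
  cases i <;> simp [csuf]

theorem csuf_ge_three_iff (S T : List Char) (i j : Nat) :
    3 ≤ csuf S T i j ↔ ∃ a b, i = a+3 ∧ j = b+3 ∧
      (S.getD a ' ' = T.getD b ' ' ∧ S.getD (a+1) ' ' = T.getD (b+1) ' ' ∧
       S.getD (a+2) ' ' = T.getD (b+2) ' ') := by
  constructor
  · intro h
    have h1 := csuf_le_left S T i j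
    have h2 := csuf_le_right S T i j
    obtain ⟨a, rfl⟩ : ∃ a, i = a + 3 := ⟨i - 3, by omega⟩
    obtain ⟨b, rfl⟩ : ∃ b, j = b + 3 := ⟨j - 3, by omega⟩
    refine ⟨a, b, rfl, rfl, ?_⟩
    simp only [csuf] at h
    split_ifs at h with e2 e1 e0 <;> simp_all [beq_iff_eq]
  · rintro ⟨a, b, rfl, rfl, h0, h1, h2⟩
    simp only [csuf, beq_iff_eq, h0, h1, h2, if_pos]
    omega


theorem cellVal_diag (S T : List Char) (i k : Nat) :
    cellVal S T i k i k = (csuf S T i k : Int) := by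
  simp only [cellVal]
  split_ifs with h
  · rfl
  · rcases Nat.eq_zero_or_pos i with hi | hi
    · subst hi; simp [csuf]
    rcases Nat.eq_zero_or_pos k with hk | hk
    · subst hk; simp [csuf_zero_right]
    · exact absurd ⟨hi, hk, Or.inl le_rfl⟩ h

theorem cnt_row (S T : List Char) (i k r : Nat) (hr : r ≤ S.length) :
    (cntAfter S T i k).getD r [] = (List.range (T.length+1)).map (fun c => cellVal S T i k r c) := by
  unfold cntAfter
  rw [List.getD_eq_getElem _ _ (by simp only [List.length_map, List.length_range]; omega)]
  simp only [List.getElem_map, List.getElem_range]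

theorem cnt_read (S T : List Char) (i k r c : Nat) (hr : r ≤ S.length) (hc : c ≤ T.length) :
    ((cntAfter S T i k).getD r []).getD c 0 = cellVal S T i k r c := by
  rw [cnt_row S T i k r hr]
  rw [List.getD_eq_getElem _ _ (by simp only [List.length_map, List.length_range]; omega)]
  simp only [List.getElem_map, List.getElem_range]


theorem cntAfter_congr (S T : List Char) (i k i' k' : Nat)
    (h : ∀ r c, r ≤ S.length → c ≤ T.length → cellVal S T i k r c = cellVal S T i' k' r c) :
    cntAfter S T i k = cntAfter S T i' k' := by
  unfold cntAfter
  apply List.map_congr_left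
  intro r hr
  apply List.map_congr_left
  intro c hc
  simp only [List.mem_range] at hr hc
  exact h r c (by omega) (by omega)

theorem cellVal_congr (S T : List Char) {i k i' k' r c : Nat}
    (h : (1 ≤ r ∧ 1 ≤ c ∧ (r ≤ i ∨ (r = i+1 ∧ c ≤ k))) ↔
         (1 ≤ r ∧ 1 ≤ c ∧ (r ≤ i' ∨ (r = i'+1 ∧ c ≤ k')))) :
    cellVal S T i k r c = cellVal S T i' k' r c := by
  simp only [cellVal]
  exact if_congr h rfl rfl

theorem cnt_set (S T : List Char) (i k : Nat) (hi : i < S.length) (hk : k < T.length) :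
    (cntAfter S T i k).set (i+1)
      (((cntAfter S T i k).getD (i+1) []).set (k+1) ((csuf S T (i+1) (k+1) : Nat) : Int))
      = cntAfter S T i (k+1) := by
  rw [cnt_row S T i k (i+1) (by omega)]
  unfold cntAfter
  apply List.ext_getElem
  · simp
  · intro r h1 h2
    simp only [List.length_map, List.length_range] at h2
    by_cases hri : r = i + 1
    · subst hri
      rw [List.getElem_set_self (by simp; omega)]
      simp only [List.getElem_map, List.getElem_range]
      apply List.ext_getElem
      · simp
      · intro c g1 g2
        simp only [List.length_map, List.length_range] at g2
        by_cases hck : c = k + 1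
        · subst hck
          rw [List.getElem_set_self (by simp; omega)]
          simp only [List.getElem_map, List.getElem_range]
          unfold cellVal
          rw [if_pos ⟨by omega, by omega, Or.inr ⟨rfl, le_rfl⟩⟩]
        · rw [List.getElem_set_ne (by omega)]
          simp only [List.getElem_map, List.getElem_range]
          exact cellVal_congr S T (by omega)
    · rw [List.getElem_set_ne (by omega)]
      simp only [List.getElem_map, List.getElem_range]
      apply List.map_congr_left
      intro c hc
      exact cellVal_congr S T (by omega)

theorem lgAfter_succ (S T : List Char) (i k : Nat) :
    lgAfter S T i (k+1) = max (lgAfter S T i k) ((csuf S T (i+1) (k+1) : Nat) : Int) := by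
  simp only [lgAfter, rowMax, Nat.cast_max, max_assoc]

theorem lgAfter_roll (S T : List Char) (i : Nat) :
    lgAfter S T i T.length = lgAfter S T (i+1) 0 := by
  simp [lgAfter, maxRows, rowMax]

theorem lgAfter_nonneg (S T : List Char) (i k : Nat) : 0 ≤ lgAfter S T i k := by
  simp only [lgAfter]; exact Int.natCast_nonneg _

theorem slice_len3 (S : List Char) (i c : Nat) (hc1 : 1 ≤ c) (hc2 : c ≤ i+1) (hi : i < S.length) :
    (PySem.List.slice S (some ((i : Int) - ((c : Nat) : Int) + 1)) (some ((i : Int) + 1))).length = c := by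
  have ha : (i : Int) - (c : Int) + 1 = ((i + 1 - c : Nat) : Int) := by omega
  have hb : (i : Int) + 1 = ((i + 1 : Nat) : Int) := by push_cast; ring
  rw [ha, hb, PySem.List.slice_natCast]
  simp only [List.length_take, List.length_drop]
  omega

theorem lcsInner_inv (S T : List Char) (i k : Nat) (hi : i < S.length) (hk : k < T.length)
    (st : LcsState) (h : LcsInv S T i k st) : LcsInv S T i (k+1) (lcsInner S T i st k) := by
  obtain ⟨cnt, lg, set⟩ := st
  obtain ⟨hcnt, hlg, hset, hiff⟩ := h
  simp only at hcnt hlg hset hiff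
  by_cases hch : (S.getD i ' ' == T.getD k ' ') = true
  · have hread : ((cnt.getD i []).getD k 0) = ((csuf S T i k : Nat) : Int) := by
      rw [hcnt, cnt_read S T i k i k (by omega) (by omega), cellVal_diag]
    have hch2 : S.getD i ' ' = T.getD k ' ' := eq_of_beq hch
    have hcs1 : csuf S T i k + 1 = csuf S T (i+1) (k+1) := by
      simp only [csuf]
      rw [if_pos hch]
    have hc : ((cnt.getD i []).getD k 0) + 1 = ((csuf S T (i+1) (k+1) : Nat) : Int) := by
      rw [hread, ← hcs1]; push_cast; ring
    have hcounter : cnt.set (i+1) ((cnt.getD (i+1) []).set (k+1) (((cnt.getD i []).getD k 0) + 1))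
        = cntAfter S T i (k+1) := by
      rw [hc, hcnt, cnt_set S T i k hi hk]
    have hlg1 : lgAfter S T i (k+1) = max lg ((csuf S T (i+1) (k+1) : Nat) : Int) := by
      rw [lgAfter_succ, hlg]
    have hslice : (PySem.List.slice S (some ((i : Int) - (((cnt.getD i []).getD k 0) + 1) + 1))
        (some ((i : Int) + 1))).length = csuf S T (i+1) (k+1) := by
      rw [hc]
      exact slice_len3 S i _ (by omega) (by have := csuf_le_left S T (i+1) (k+1); omega) hi
    unfold lcsInner
    rw [if_pos hch]
    dsimp only
    split_ifs with hgt heq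
    · refine ⟨hcounter, ?_, ?_, ?_⟩
      · rw [hlg1]
        rw [hc] at hgt ⊢
        exact (max_eq_right hgt.le).symm
      · intro x hx
        simp only [List.mem_singleton] at hx
        subst hx
        rw [hslice, hc]
      · constructor
        · intro hcon; simp at hcon
        · intro hcon
          exfalso
          dsimp only at hcon
          rw [hc] at hcon
          have := hcs1
          omega
    · rw [beq_iff_eq] at heq
      refine ⟨hcounter, ?_, ?_, ?_⟩
      · have hlgcs : ((csuf S T (i+1) (k+1) : Nat) : Int) = lg := by rw [← hc, heq]
        rw [hlg1, hlgcs, max_self]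
      · intro x hx
        rcases List.mem_append.mp hx with hx' | hx'
        · exact hset x hx'
        · simp only [List.mem_singleton] at hx'
          subst hx'
          dsimp only
          rw [hslice, ← hc]
          exact heq
      · constructor
        · intro hcon; simp at hcon
        · intro hcon
          exfalso
          dsimp only at hcon
          rw [← heq, hc] at hcon
          have := hcs1
          omega
    · rw [beq_iff_eq] at heq
      refine ⟨hcounter, ?_, hset, hiff⟩
      dsimp only
      rw [hlg1]
      have hlt : ((csuf S T (i+1) (k+1) : Nat) : Int) ≤ lg := by
        rw [← hc]
        omega
      exact (max_eq_left hlt).symm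
  · have hch2 : S.getD i ' ' ≠ T.getD k ' ' := by
      intro he; exact hch (by rw [he]; exact beq_self_eq_true _)
    have h0 : csuf S T (i+1) (k+1) = 0 := by
      simp only [csuf]
      rw [if_neg hch]
    unfold lcsInner
    rw [if_neg hch]
    refine ⟨?_, ?_, hset, hiff⟩
    · rw [hcnt]
      apply cntAfter_congr
      intro r c' hr hc'
      by_cases hrc : r = i+1 ∧ c' = k+1
      · obtain ⟨h1, h2⟩ := hrc
        subst h1; subst h2
        unfold cellVal
        rw [if_neg (by omega), if_pos ⟨by omega, by omega, Or.inr ⟨rfl, le_rfl⟩⟩, h0]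
        simp
      · exact cellVal_congr S T (by omega)
    · rw [hlg, lgAfter_succ, h0]
      exact (max_eq_left (lgAfter_nonneg S T i k)).symm

theorem inner_fold_inv (S T : List Char) (i : Nat) (hi : i < S.length) :
    ∀ k, k ≤ T.length → ∀ st, LcsInv S T i 0 st →
      LcsInv S T i k ((List.range k).foldl (lcsInner S T i) st) := by
  intro k
  induction k with
  | zero => intro _ st h; simpa using h
  | succ k ih =>
    intro hk st h
    rw [List.range_succ, List.foldl_append]
    simp only [List.foldl_cons, List.foldl_nil]
    exact lcsInner_inv S T i k hi (by omega) _ (ih (by omega) st h)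

theorem inv_roll (S T : List Char) (i : Nat) (st : LcsState) (h : LcsInv S T i T.length st) :
    LcsInv S T (i+1) 0 st := by
  obtain ⟨hc, hl, hs, hif⟩ := h
  refine ⟨?_, ?_, hs, hif⟩
  · rw [hc]
    apply cntAfter_congr
    intro r c hr hcc
    exact cellVal_congr S T (by omega)
  · rw [hl, lgAfter_roll]

theorem outer_fold_inv (S T : List Char) :
    ∀ i, i ≤ S.length → ∀ st, LcsInv S T 0 0 st →
      LcsInv S T i 0 ((List.range i).foldl
        (fun st r => (List.range T.length).foldl (lcsInner S T r) st) st) := by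
  intro i
  induction i with
  | zero => intro _ st h; simpa using h
  | succ i ih =>
    intro hi st h
    rw [List.range_succ, List.foldl_append]
    simp only [List.foldl_cons, List.foldl_nil]
    apply inv_roll
    exact inner_fold_inv S T i (by omega) T.length le_rfl _ (ih (by omega) st h)

theorem init_inv (S T : List Char) :
    LcsInv S T 0 0 (((List.range (S.length+1)).map
        (fun _ => (List.range (T.length+1)).map (fun _ => (0 : Int))),
      (0 : Int), ([] : List (List Char))) : LcsState) := by
  refine ⟨?_, ?_, by simp, by simp⟩
  · show _ = cntAfter S T 0 0
    unfold cntAfter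
    apply List.map_congr_left
    intro r hr
    apply List.map_congr_left
    intro c hc
    unfold cellVal
    exact (if_neg (by omega)).symm
  · show (0 : Int) = lgAfter S T 0 0
    simp [lgAfter, maxRows, rowMax]

theorem lcs_fold_inv (S T : List Char) :
    LcsInv S T S.length 0
      ((List.range S.length).foldl (fun st i => (List.range T.length).foldl (lcsInner S T i) st)
        (((List.range (S.length+1)).map (fun _ => (List.range (T.length+1)).map (fun _ => (0 : Int))),
          (0 : Int), ([] : List (List Char))) : LcsState)) := by
  exact outer_fold_inv S T S.length le_rfl _ (init_inv S T)

theorem lcsA_length (S T : List Char) : (lcsA S T).length = maxRows S T S.length := by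
  obtain ⟨hc, hl, hs, hif⟩ := lcs_fold_inv S T
  unfold lcsA
  set L := (List.range S.length).foldl
      (fun st i => (List.range T.length).foldl (lcsInner S T i) st)
      (((List.range (S.length+1)).map
          (fun _ => (List.range (T.length+1)).map (fun _ => (0 : Int))),
        (0 : Int), ([] : List (List Char))) : LcsState) with hL
  have hlg : L.2.1 = ((maxRows S T S.length : Nat) : Int) := by
    rw [hl]
    simp [lgAfter, rowMax]
  show (if L.2.2.length > 0
      then (PySem.List.sorted L.2.2 (fun x => (x.length : Int)) true).headD []
      else []).length = maxRows S T S.length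
  split_ifs with hne
  · have hperm := PySem.List.sorted_perm L.2.2 (fun x => (x.length : Int)) true
    have hmem : (PySem.List.sorted L.2.2 (fun x => (x.length : Int)) true).headD [] ∈ L.2.2 := by
      rcases hsl : PySem.List.sorted L.2.2 (fun x => (x.length : Int)) true with _ | ⟨a, t⟩
      · rw [hsl] at hperm
        have hnil2 := hperm.symm.eq_nil
        rw [hnil2] at hne
        simp at hne
      · rw [hsl] at hperm
        simp only [List.headD_cons]
        exact hperm.mem_iff.mp (by simp)
    have hlen := hs _ hmem
    rw [hlg] at hlen
    exact_mod_cast hlen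
  · have hnil : L.2.2 = [] := by
      cases h22 : L.2.2 with
      | nil => rfl
      | cons a t => rw [h22] at hne; simp at hne
    have h0 : L.2.1 = 0 := hif.mp hnil
    rw [h0] at hlg
    simp only [List.length_nil]
    omega

theorem rowMax_ge_three_iff (S T : List Char) (r k : Nat) :
    3 ≤ rowMax S T r k ↔ ∃ c, c < k ∧ 3 ≤ csuf S T r (c+1) := by
  induction k with
  | zero => simp [rowMax]
  | succ k ih =>
    simp only [rowMax, le_max_iff, ih]
    constructor
    · rintro (⟨c, hc, h⟩ | h)
      · exact ⟨c, by omega, h⟩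
      · exact ⟨k, by omega, h⟩
    · rintro ⟨c, hc, h⟩
      rcases Nat.lt_or_ge c k with h' | h'
      · exact Or.inl ⟨c, h', h⟩
      · have hck : c = k := by omega
        subst hck; exact Or.inr h

theorem maxRows_ge_three_iff (S T : List Char) :
    3 ≤ maxRows S T S.length ↔
      ∃ r c, r < S.length ∧ c < T.length ∧ 3 ≤ csuf S T (r+1) (c+1) := by
  generalize S.length = N
  induction N with
  | zero => simp [maxRows]
  | succ i ih =>
    simp only [maxRows, le_max_iff, ih, rowMax_ge_three_iff]
    constructor
    · rintro (⟨r, c, hr, hc, h⟩ | ⟨c, hc, h⟩)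
      · exact ⟨r, c, by omega, hc, h⟩
      · exact ⟨i, c, by omega, hc, h⟩
    · rintro ⟨r, c, hr, hc, h⟩
      rcases Nat.lt_or_ge r i with h' | h'
      · exact Or.inl ⟨r, c, h', hc, h⟩
      · have hri : r = i := by omega
        subst hri; exact Or.inr ⟨c, hc, h⟩

theorem take3_eq (S : List Char) (a : Nat) (h : a + 3 ≤ S.length) :
    (S.drop a).take 3 = [S.getD a ' ', S.getD (a+1) ' ', S.getD (a+2) ' '] := by
  rw [List.drop_eq_getElem_cons (by omega : a < S.length)]
  rw [List.drop_eq_getElem_cons (by omega : a + 1 < S.length)]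
  rw [List.drop_eq_getElem_cons (by omega : a + 2 < S.length)]
  rw [List.getD_eq_getElem _ _ (by omega : a < S.length),
    List.getD_eq_getElem _ _ (by omega : a + 1 < S.length),
    List.getD_eq_getElem _ _ (by omega : a + 2 < S.length)]
  rfl

theorem window_eq_iff (S T : List Char) (a b : Nat) (ha : a + 3 ≤ S.length) (hb : b + 3 ≤ T.length) :
    (S.drop a).take 3 = (T.drop b).take 3 ↔
      (S.getD a ' ' = T.getD b ' ' ∧ S.getD (a+1) ' ' = T.getD (b+1) ' ' ∧
       S.getD (a+2) ' ' = T.getD (b+2) ' ') := by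
  rw [take3_eq S a ha, take3_eq T b hb]
  simp

theorem lcs_ge_three_iff (S T : List Char) :
    3 ≤ (lcsA S T).length ↔ ∃ a, a + 3 ≤ S.length ∧ ((S.drop a).take 3) <:+: T := by
  rw [lcsA_length, maxRows_ge_three_iff]
  constructor
  · rintro ⟨r, c, hr, hc, h3⟩
    rw [csuf_ge_three_iff] at h3
    obtain ⟨a, b, ha, hb, h⟩ := h3
    have ha' : a + 3 ≤ S.length := by omega
    have hb' : b + 3 ≤ T.length := by omega
    refine ⟨a, ha', ?_⟩
    rw [(window_eq_iff S T a b ha' hb').mpr h]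
    exact (List.take_prefix 3 (T.drop b)).isInfix.trans (List.drop_suffix b T).isInfix
  · rintro ⟨a, ha, hinf⟩
    obtain ⟨s, t, hst⟩ := hinf
    have hwlen : ((S.drop a).take 3).length = 3 := by simp; omega
    have hTlen : s.length + 3 + t.length = T.length := by
      rw [← hst]; simp [hwlen]; omega
    refine ⟨a + 2, s.length + 2, by omega, by omega, ?_⟩
    rw [csuf_ge_three_iff]
    refine ⟨a, s.length, rfl, rfl, ?_⟩
    apply (window_eq_iff S T a s.length ha (by omega)).mp
    have hdrop : (T.drop s.length).take 3 = (S.drop a).take 3 := by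
      rw [← hst, List.append_assoc, List.drop_left]
      exact List.take_left' hwlen
    exact hdrop.symm

theorem inner_test_eq (spl key : String) :
    (decide (3 ≤ (lcsA spl.toList key.toList).length)) =
    (List.range (spl.toList.length - 2)).any (fun i =>
      PySem.Chars.isIn ((spl.toList.drop i).take 3) key.toList) := by
  rw [Bool.eq_iff_iff]
  simp only [decide_eq_true_eq, List.any_eq_true, List.mem_range, PySem.Chars.isIn_iff_infix]
  rw [lcs_ge_three_iff]
  constructor
  · rintro ⟨a, ha, h⟩; exact ⟨a, by omega, h⟩
  · rintro ⟨a, ha, h⟩; exact ⟨a, by omega, h⟩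

theorem ports_eq (v key : String) (words : List String)
    (hA : PySem.Dict.get? dataToFindA key = some words)
    (hB : PySem.Dict.get? dataToFindB key = some words) :
    isDataToFind v key = isDataToFind_alt v key := by
  have hfun : (fun spl => words.contains spl ||
      (PySem.Str.len spl == PySem.Str.len key &&
        decide (3 ≤ (lcsA spl.toList key.toList).length)))
      = (fun spl => words.contains spl ||
      (PySem.Str.len spl == PySem.Str.len key &&
        (List.range (spl.toList.length - 2)).any (fun i =>
          PySem.Chars.isIn ((spl.toList.drop i).take 3) key.toList))) := by
    funext spl; rw [inner_test_eq]
  unfold isDataToFind isDataToFind_alt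
  rw [hA, hB]
  simp only [hfun]

-- ===== VERDICT (by name: the statement is the Claim_ definition above) =====
theorem isDataToFind_spec : Claim_equal_isDataToFind := by
  intro v key _ hpre
  unfold Spec_isDataToFind
  rcases hpre with h | h | h | h | h <;> subst h <;>
    exact ports_eq _ _ _ rfl rfl
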